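-- pv_equiv track=rewrite | github.com/batazdes/Pulse_analyzer_final | app (2).py | find_pulses
-- ===== SOURCE A (Python) =====
-- def find_pulses(binary, min_width):
--     pulses, in_pulse, start = [], False, 0
--     for i, val in enumerate(binary):
--         if val and not in_pulse:
--             in_pulse, start = True, i
--         elif not val and in_pulse:
--             in_pulse = False
--             if i - start >= min_width:
--                 pulses.append((start, i - 1))
--     if in_pulse and len(binary) - start >= min_width:
--         pulses.append((start, len(binary) - 1))
--     return pulses
-- ===== SOURCE B (Python) =====
-- from itertools import groupby
--
-- def find_pulses(binary, min_width):
--     pulses, idx = [], 0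
--     for val, grp in groupby(binary, key=bool):
--         length = sum(1 for _ in grp)
--         if val and length >= min_width:
--             pulses.append((idx, idx + length - 1))
--         idx += length
--     return pulses
-- ===== Notes on version B (the rewrite author's own statement) =====
-- stated objective: idiomatic
-- what changed: Replaces the in_pulse flag machine with transition branches and a separate final-run tail append by itertools.groupby over truthiness: one loop over maximal runs with a running index offset.
import Mathlib
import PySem

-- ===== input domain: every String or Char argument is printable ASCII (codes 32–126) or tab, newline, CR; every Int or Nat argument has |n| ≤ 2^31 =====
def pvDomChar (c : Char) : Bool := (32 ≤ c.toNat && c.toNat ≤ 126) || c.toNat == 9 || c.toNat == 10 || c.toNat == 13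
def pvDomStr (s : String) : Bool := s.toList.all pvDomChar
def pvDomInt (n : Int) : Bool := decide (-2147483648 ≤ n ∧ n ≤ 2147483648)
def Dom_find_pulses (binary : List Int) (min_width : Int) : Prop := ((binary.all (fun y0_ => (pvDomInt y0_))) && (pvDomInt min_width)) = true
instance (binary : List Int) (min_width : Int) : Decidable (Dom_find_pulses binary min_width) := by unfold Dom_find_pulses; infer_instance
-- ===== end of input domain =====

-- B replaces A's in_pulse flag machine (transition branches + separate tail append) by an
-- itertools.groupby-style decomposition into maximal truthiness runs with a running index offset.

-- ===== PORT A =====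
-- loop body of A: state = (pulses, in_pulse, start), p = (i, val)
def pvStepA (min_width : Int) (st : List (Int × Int) × Bool × Int) (p : Int × Int) :
    List (Int × Int) × Bool × Int :=
  if p.2 ≠ 0 ∧ st.2.1 = false then (st.1, true, p.1)
  else if p.2 = 0 ∧ st.2.1 = true then
    ((if p.1 - st.2.2 ≥ min_width then st.1 ++ [(st.2.2, p.1 - 1)] else st.1), false, st.2.2)
  else st

-- A's trailing 'if in_pulse and len(binary) - start >= min_width' append
def pvFinishA (min_width : Int) (st : List (Int × Int) × Bool × Int) (total : Int) :
    List (Int × Int) :=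
  if st.2.1 = true ∧ total - st.2.2 ≥ min_width then st.1 ++ [(st.2.2, total - 1)] else st.1

def find_pulses (binary : List Int) (min_width : Int) : List (Int × Int) :=
  pvFinishA min_width
    ((PySem.List.enumerate binary 0).foldl (pvStepA min_width) ([], false, 0))
    (binary.length : Int)

-- ===== PORT B =====
-- itertools.groupby(binary, key=bool): maximal runs, each as (key, run length)
def pvRunsAux (b : Bool) (n : Nat) : List Int → List (Bool × Nat)
  | [] => [(b, n)]
  | x :: xs =>
    if decide (x ≠ 0) = b then pvRunsAux b (n + 1) xs
    else (b, n) :: pvRunsAux (decide (x ≠ 0)) 1 xs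

def pvGroupby : List Int → List (Bool × Nat)
  | [] => []
  | x :: xs => pvRunsAux (decide (x ≠ 0)) 1 xs

-- loop body of B: state = (pulses, idx), g = (val, length)
def pvStepB (min_width : Int) (st : List (Int × Int) × Int) (g : Bool × Nat) :
    List (Int × Int) × Int :=
  ((if g.1 = true ∧ (g.2 : Int) ≥ min_width then st.1 ++ [(st.2, st.2 + g.2 - 1)] else st.1),
   st.2 + g.2)

def find_pulses_alt (binary : List Int) (min_width : Int) : List (Int × Int) :=
  ((pvGroupby binary).foldl (pvStepB min_width) ([], 0)).1

-- ===== PRECONDITION & SPEC =====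
def Spec_find_pulses (binary : List Int) (min_width : Int) (out : List (Int × Int)) : Prop := out = find_pulses_alt binary min_width
instance (binary : List Int) (min_width : Int) (out : List (Int × Int)) : Decidable (Spec_find_pulses binary min_width out) := by unfold Spec_find_pulses; infer_instance

-- ===== CLAIM (what is proved, stated in full; the proofs are below) =====
def Claim_equal_find_pulses : Prop := ∀ (binary : List Int) (min_width : Int), Dom_find_pulses binary min_width → Spec_find_pulses binary min_width (find_pulses binary min_width)

-- ===== LEMMAS AND PROOFS =====

-- Invariant: in the middle of a maximal run of kind b that has had n elements (which started at
-- index i - n), A's remaining fold + tail append equals B's fold over the remaining run list.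
lemma pv_key (mw : Int) (xs : List Int) : ∀ (b : Bool) (n : Nat) (i : Int) (s : Int)
    (acc : List (Int × Int)), (b = true → s = i - n) → 1 ≤ n →
    pvFinishA mw ((PySem.List.enumerate xs i).foldl (pvStepA mw) (acc, b, s))
        (i + xs.length)
      = (((pvRunsAux b n xs).foldl (pvStepB mw) (acc, i - n))).1 := by
  induction xs with
  | nil =>
    intro b n i s acc hs hn
    simp [PySem.List.enumerate_nil, pvRunsAux, pvFinishA, pvStepB]
    cases b with
    | false => simp
    | true =>
      have hs' := hs rfl
      subst hs'
      simp only [true_and]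
      have h1 : (i - (i - (n:Int)) ≥ mw) ↔ ((n:Int) ≥ mw) := by omega
      have h2 : (i : Int) - 1 = i - (n:Int) + (n:Int) - 1 := by omega
      split_ifs with c1 c2 c2 <;> simp_all
  | cons x xs ih =>
    intro b n i s acc hs hn
    rw [PySem.List.enumerate_cons]
    simp only [List.foldl_cons]
    by_cases hx : x = 0
    · cases b with
      | false =>
        -- falsy element extends falsy run: A's step is a no-op
        have hstep : pvStepA mw (acc, false, s) (i, x) = (acc, false, s) := by
          simp [pvStepA, hx]
        rw [hstep]
        have hrec : pvRunsAux false n (x :: xs) = pvRunsAux false (n + 1) xs := by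
          simp [pvRunsAux, hx]
        rw [hrec]
        have := ih false (n + 1) (i + 1) s acc (by simp) (by omega)
        have harith : (i + 1 : Int) - ((n : Nat) + 1 : Nat) = i - n := by push_cast; omega
        have hlen : i + ((x :: xs).length : Int) = (i + 1) + xs.length := by
          simp; omega
        rw [hlen, this, harith]
      | true =>
        -- falsy element closes a truthy run: A appends iff n ≥ mw; B does the same on (true, n)
        have hs' := hs rfl
        subst hs'
        have hstep : pvStepA mw (acc, true, i - (n:Int)) (i, x)
            = ((if (n:Int) ≥ mw then acc ++ [(i - (n:Int), i - 1)] else acc), false, i - (n:Int)) := by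
          have : (i : Int) - (i - (n:Int)) = (n:Int) := by omega
          simp [pvStepA, hx, this]
        rw [hstep]
        have hrec : pvRunsAux true n (x :: xs) = (true, n) :: pvRunsAux false 1 xs := by
          simp [pvRunsAux, hx]
        rw [hrec]
        simp only [List.foldl_cons]
        have hB : pvStepB mw (acc, i - (n:Int)) (true, n)
            = ((if (n:Int) ≥ mw then acc ++ [(i - (n:Int), i - 1)] else acc), i) := by
          have h2 : i - (n:Int) + (n:Int) - 1 = i - 1 := by omega
          have h3 : i - (n:Int) + (n:Int) = i := by omega
          simp [pvStepB, h3]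
        rw [hB]
        have := ih false 1 (i + 1) (i - (n:Int))
          (if (n:Int) ≥ mw then acc ++ [(i - (n:Int), i - 1)] else acc) (by simp) (by omega)
        have harith : (i + 1 : Int) - ((1:Nat) : Int) = i := by omega
        rw [harith] at this
        have hlen : i + ((x :: xs).length : Int) = (i + 1) + xs.length := by simp; omega
        rw [hlen, this]
    · cases b with
      | false =>
        -- truthy element opens a run: A sets (true, start := i)
        have hstep : pvStepA mw (acc, false, s) (i, x) = (acc, true, i) := by
          simp [pvStepA, hx]
        rw [hstep]
        have hrec : pvRunsAux false n (x :: xs) = (false, n) :: pvRunsAux true 1 xs := by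
          simp [pvRunsAux, hx]
        rw [hrec]
        simp only [List.foldl_cons]
        have hB : pvStepB mw (acc, i - (n:Int)) (false, n) = (acc, i) := by
          have h3 : i - (n:Int) + (n:Int) = i := by omega
          simp [pvStepB, h3]
        rw [hB]
        have := ih true 1 (i + 1) i acc (by intro _; push_cast; omega) (by omega)
        have harith : (i + 1 : Int) - ((1:Nat) : Int) = i := by omega
        rw [harith] at this
        have hlen : i + ((x :: xs).length : Int) = (i + 1) + xs.length := by simp; omega
        rw [hlen, this]
      | true =>
        -- truthy element extends truthy run: A's step is a no-op
        have hs' := hs rfl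
        subst hs'
        have hstep : pvStepA mw (acc, true, i - (n:Int)) (i, x) = (acc, true, i - (n:Int)) := by
          simp [pvStepA, hx]
        rw [hstep]
        have hrec : pvRunsAux true n (x :: xs) = pvRunsAux true (n + 1) xs := by
          simp [pvRunsAux, hx]
        rw [hrec]
        have := ih true (n + 1) (i + 1) (i - (n:Int)) acc (by intro _; push_cast; omega) (by omega)
        have harith : (i + 1 : Int) - (((n:Nat) + 1 : Nat) : Int) = i - (n:Int) := by
          push_cast; omega
        rw [harith] at this
        have hlen : i + ((x :: xs).length : Int) = (i + 1) + xs.length := by simp; omega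
        rw [hlen, this]

-- ===== VERDICT (by name: the statement is the Claim_ definition above) =====
theorem find_pulses_spec : Claim_equal_find_pulses := by
  intro binary mw _
  unfold Spec_find_pulses find_pulses find_pulses_alt
  cases binary with
  | nil => simp [PySem.List.enumerate_nil, pvGroupby, pvFinishA]
  | cons x xs =>
    rw [PySem.List.enumerate_cons]
    simp only [List.foldl_cons]
    by_cases hx : x = 0
    · have hstep : pvStepA mw ([], false, 0) ((0:Int), x) = ([], false, 0) := by
        simp [pvStepA, hx]
      rw [hstep]
      have hg : pvGroupby (x :: xs) = pvRunsAux false 1 xs := by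
        simp [pvGroupby, hx]
      rw [hg]
      have := pv_key mw xs false 1 1 0 [] (by simp) (by omega)
      rw [show ((1:Int) + xs.length) = ((x :: xs).length : Int) by simp; omega] at this
      simpa using this
    · have hstep : pvStepA mw ([], false, 0) ((0:Int), x) = ([], true, 0) := by
        simp [pvStepA, hx]
      rw [hstep]
      have hg : pvGroupby (x :: xs) = pvRunsAux true 1 xs := by
        simp [pvGroupby, hx]
      rw [hg]
      have := pv_key mw xs true 1 1 0 [] (by intro _; norm_num) (by omega)
      rw [show ((1:Int) + xs.length) = ((x :: xs).length : Int) by simp; omega] at this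
      simpa using this
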